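-- pv_equiv track=rewrite | github.com/zero0205/Algorithm_Python | baekjoon/String/20437_문자열 게임 2.py | str_game
-- ===== SOURCE A (Python) =====
-- from collections import defaultdict
--
-- def str_game(w, k):
--     over_k = defaultdict(list)
--     for i in range(len(w)):
--         # w에 k개 이상 포함된 문자를 over_k 딕셔너리에 {문자 : 위치리스트} 형태로 저장
--         if w.count(w[i]) >= k:
--             over_k[w[i]].append(i)
--     if len(over_k) == 0:
--         return [-1]
--     min_len = 10001
--     max_len = 0
--     for pos_list in over_k.values():
--         for j in range(len(pos_list)-k+1):
--             # 해당 문자를 k개만큼 포함한 문자열의 길이 : pos_list[j+k-1]-pos_list[j]+1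
--             min_len = min(min_len, pos_list[j+k-1]-pos_list[j]+1)
--             max_len = max(max_len, pos_list[j+k-1]-pos_list[j]+1)
--     return [min_len, max_len]
-- ===== SOURCE B (Python) =====
-- # Single streaming pass: per character keep only the last k positions in a bounded
-- # deque; each time a deque fills, one k-occurrence window ends here -> update the
-- # running min/max.  No position lists are built and no second stage runs.
-- from collections import deque
--
--
-- def str_game(w, k):
--     min_len, max_len = 10001, 0
--     last = {}
--     for i, c in enumerate(w):
--         buf = last.get(c)
--         if buf is None:
--             buf = deque(maxlen=k)
--             last[c] = buf
--         buf.append(i)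
--         if len(buf) == k:
--             span = i - buf[0] + 1
--             if span < min_len:
--                 min_len = span
--             if span > max_len:
--                 max_len = span
--     if max_len == 0:
--         return [-1]
--     return [min_len, max_len]
-- ===== Notes on version B (the rewrite author's own statement) =====
-- stated objective: faster
-- what changed: B replaces A's two-stage scheme (quadratic per-index w.count filter building full position lists, then a nested window sweep) by a single streaming pass that keeps only the last k positions of each character in a bounded deque and updates a running min/max each time a deque fills.
import Mathlib
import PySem

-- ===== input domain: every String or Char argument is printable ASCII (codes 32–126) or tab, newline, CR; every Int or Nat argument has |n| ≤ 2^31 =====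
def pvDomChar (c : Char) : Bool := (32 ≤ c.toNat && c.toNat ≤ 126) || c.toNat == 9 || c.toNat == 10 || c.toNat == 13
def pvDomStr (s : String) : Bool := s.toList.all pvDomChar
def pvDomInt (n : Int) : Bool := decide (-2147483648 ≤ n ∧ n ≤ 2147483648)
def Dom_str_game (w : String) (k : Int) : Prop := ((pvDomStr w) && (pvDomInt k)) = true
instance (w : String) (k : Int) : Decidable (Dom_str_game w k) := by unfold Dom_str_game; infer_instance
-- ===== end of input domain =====

-- B makes ONE streaming pass keeping only the last k positions of each character in a
-- bounded buffer (deque(maxlen=k)) and updates a running min/max whenever a buffer fills;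
-- equal return value to A on Pre_ (k ≥ 1, or empty w).

-- ===== PORT A =====
-- literal port of A; the string is handled on its code-point list (PySem.Chars / PySem.List)
def str_game (w : String) (k : Int) : List Int :=
  let l := w.toList
  let over_k : PySem.Dict Char (List Int) :=
    (PySem.List.pyRange 0 (PySem.Str.len w) 1).foldl
      (fun d i =>
        -- w[i] is PySem.List.pyGetD l i ' ' (i ∈ range(len(w)) is always in range)
        if k ≤ (PySem.Chars.count l [PySem.List.pyGetD l i ' '] : Int)     -- w.count(w[i]) >= k
        then d.modify (PySem.List.pyGetD l i ' ') [] (· ++ [i]) else d)    -- over_k[w[i]].append(i)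
      PySem.Dict.empty
  if over_k.size = 0 then [-1]
  else
    let r :=
      over_k.values.foldl
        (fun (mm : Int × Int) pos =>
          (PySem.List.pyRange 0 ((pos.length : Int) - k + 1) 1).foldl
            (fun mm j =>
              (min mm.1 (PySem.List.pyGetD pos (j + k - 1) 0 - PySem.List.pyGetD pos j 0 + 1),
               max mm.2 (PySem.List.pyGetD pos (j + k - 1) 0 - PySem.List.pyGetD pos j 0 + 1)))
            mm)
        (10001, 0)
    [r.1, r.2]

-- ===== PORT B =====
-- literal port of Source B: the state is (min_len, max_len, last); `last` maps each character
-- to its deque(maxlen=k): appending to a full deque drops the leftmost element.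
def str_game_alt (w : String) (k : Int) : List Int :=
  let st := (PySem.List.enumerate w.toList).foldl
    (fun (st : Int × Int × PySem.Dict Char (List Int)) p =>
      let buf := st.2.2.getD p.2 []                                       -- last.get(c) / fresh deque
      let buf := if (buf.length : Int) = k then buf.drop 1 ++ [p.1]       -- deque(maxlen=k).append(i)
                 else buf ++ [p.1]
      let d := st.2.2.insert p.2 buf
      if (buf.length : Int) = k then
        let span := p.1 - PySem.List.pyGetD buf 0 0 + 1                   -- i - buf[0] + 1
        (min st.1 span, max st.2.1 span, d)
      else (st.1, st.2.1, d))
    (10001, 0, PySem.Dict.empty)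
  if st.2.1 = 0 then [-1] else [st.1, st.2.1]

-- ===== PRECONDITION & SPEC =====
-- Pre_ excludes k ≤ 0 on a nonempty string, where A raises IndexError (its inner loop
-- then runs j past the end of each position list); B raises there too (deque misuse).
def Pre_str_game (w : String) (k : Int) : Prop := 1 ≤ k ∨ w = ""
instance (w : String) (k : Int) : Decidable (Pre_str_game w k) := by unfold Pre_str_game; infer_instance
def pvWitness_str_game : String × Int := ("aabcaa", 2)

def Spec_str_game (w : String) (k : Int) (out : List Int) : Prop := out = str_game_alt w k
instance (w : String) (k : Int) (out : List Int) : Decidable (Spec_str_game w k out) := by unfold Spec_str_game; infer_instance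

-- ===== CLAIM (what is proved, stated in full; the proofs are below) =====
def Claim_equal_str_game : Prop := ∀ (w : String) (k : Int), Dom_str_game w k → Pre_str_game w k → Spec_str_game w k (str_game w k)

-- ===== LEMMAS AND PROOFS =====

-- `set(...)` commutes with filtering by an element property
theorem pv_add_filter (q : Char → Bool) (s : List Char) (x : Char) :
    (PySem.Set.add s x).filter q = if q x then PySem.Set.add (s.filter q) x else s.filter q := by
  simp only [PySem.Set.add, PySem.Set.contains]
  by_cases hx : s.contains x
  · have hmem : x ∈ s := by simpa using hx
    simp only [hx, if_true]
    by_cases hq : q x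
    · simp [hq]; exact hmem
    · simp [hq]
  · have hmem : x ∉ s := by simpa using hx
    simp only [hx]
    by_cases hq : q x
    · simp [List.filter_append, hq]; exact hmem
    · simp [List.filter_append, hq]

theorem pv_foldl_add_filter (q : Char → Bool) (l : List Char) :
    ∀ s : List Char, (l.filter q).foldl PySem.Set.add (s.filter q) = (l.foldl PySem.Set.add s).filter q := by
  induction l with
  | nil => intro s; rfl
  | cons x t ih =>
    intro s
    by_cases hq : q x
    · simp only [List.filter_cons, hq, if_pos, List.foldl_cons]
      have h3 : PySem.Set.add (s.filter q) x = (PySem.Set.add s x).filter q := by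
        rw [pv_add_filter, if_pos hq]
      rw [h3, ih (PySem.Set.add s x)]
    · simp only [List.filter_cons, hq, Bool.false_eq_true, if_false, List.foldl_cons]
      have h3 : s.filter q = (PySem.Set.add s x).filter q := by rw [pv_add_filter, if_neg hq]
      rw [h3, ih (PySem.Set.add s x)]

theorem pv_ofList_filter (q : Char → Bool) (l : List Char) :
    PySem.Set.ofList (l.filter q) = (PySem.Set.ofList l).filter q := by
  have h := pv_foldl_add_filter q l []
  simpa [PySem.Set.ofList_eq_foldl] using h

-- str.count of a single character is List.count
theorem pv_go_count (c : Char) : ∀ (t : List Char) (fuel acc : Nat), t.length ≤ fuel →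
    PySem.Chars.count.go [c] fuel t acc = acc + t.count c := by
  intro t
  induction t with
  | nil => intro fuel acc h; cases fuel <;> simp [PySem.Chars.count.go]
  | cons x t ih =>
    intro fuel acc h
    cases fuel with
    | zero => simp at h
    | succ f =>
      simp only [PySem.Chars.count.go]
      by_cases hx : x = c
      · subst hx
        simp only [List.isPrefixOf, BEq.refl, Bool.true_and, if_true,
          List.length_singleton, List.drop_one, List.tail_cons]
        rw [ih f (acc + 1) (by simpa using h)]
        simp
        omega
      · have hbeq : (c == x) = false := by simpa using fun h' => hx h'.symm
        simp only [List.isPrefixOf, hbeq, Bool.false_and, Bool.false_eq_true, if_false]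
        rw [ih f acc (by simpa using h)]
        simp [hx]

theorem pv_count_singleton (l : List Char) (c : Char) : PySem.Chars.count l [c] = l.count c := by
  simp only [PySem.Chars.count, List.isEmpty_cons]
  exact (pv_go_count c l l.length 0 le_rfl).trans (by omega)

-- the grouping dict  {c : [positions of c]}  built by modify-append
def pvGrp (m : List (Int × Char)) : PySem.Dict Char (List Int) :=
  m.foldl (fun d p => d.modify p.2 [] (· ++ [p.1])) PySem.Dict.empty

theorem pv_keys_grp (m : List (Int × Char)) : (pvGrp m).keys = PySem.Set.ofList (m.map (·.2)) := by
  unfold pvGrp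
  rw [PySem.Dict.keys_foldl_modify_key]
  simp [PySem.Set.update]
  rfl

theorem pv_nodup_grp (m : List (Int × Char)) : (pvGrp m).keys.Nodup := by
  unfold pvGrp
  exact PySem.Dict.nodup_keys_foldl_modify_key m (·.2) [] (fun d p => (· ++ [p.1])) PySem.Dict.empty (by simp)

theorem pv_getD_grp (m : List (Int × Char)) (c : Char) :
    (pvGrp m).getD c [] = (m.filter (fun p => p.2 == c)).map (·.1) := by
  unfold pvGrp
  have h : m.foldl (fun d p => d.modify p.2 [] (· ++ [p.1])) PySem.Dict.empty
      = (m.map Prod.swap).foldl (fun d p => d.modify p.1 [] (· ++ [p.2])) PySem.Dict.empty := by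
    rw [List.foldl_map]; rfl
  rw [h, PySem.Dict.getD_foldl_modify_append]
  simp [List.filter_map, Function.comp_def]

theorem pv_values_grp (m : List (Int × Char)) :
    (pvGrp m).values = (PySem.Set.ofList (m.map (·.2))).map
      (fun c => (m.filter (fun p => p.2 == c)).map (·.1)) := by
  have h := PySem.Dict.values_eq_map_keys (pvGrp m) (pv_nodup_grp m) []
  rw [h, pv_keys_grp]
  exact List.map_congr_left (fun c _ => pv_getD_grp m c)

-- proof-side abbreviations: the qualifying test, per-char position list, window list
def pvQ (l : List Char) (k : Int) : Char → Bool := fun c => decide (k ≤ (l.count c : Int))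

def pvP (e : List (Int × Char)) (c : Char) : List Int := (e.filter (fun p => p.2 == c)).map (·.1)

def pvW (k : Int) (q : List Int) : List Int :=
  (PySem.List.pyRange 0 ((q.length : Int) - k + 1) 1).map
    (fun j => PySem.List.pyGetD q (j + k - 1) 0 - PySem.List.pyGetD q j 0 + 1)

def pvV (l : List Char) (k : Int) : List (List Int) :=
  ((PySem.Set.ofList l).filter (pvQ l k)).map (pvP (PySem.List.enumerate l))

def pvC (l : List Char) (k : Int) : List Int := (pvV l k).flatMap (pvW k)

theorem pv_len_P (l : List Char) (c : Char) :
    (pvP (PySem.List.enumerate l) c).length = l.count c := by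
  have h : (l.count c) = ((PySem.List.enumerate l).map (·.2)).count c := by
    rw [PySem.List.map_snd_enumerate]
  rw [h]
  simp only [pvP, List.length_map, List.count, List.countP_map]
  rw [← List.countP_eq_length_filter]
  rfl

theorem pv_pairwise_P (l : List Char) (c : Char) :
    (pvP (PySem.List.enumerate l) c).Pairwise (· < ·) := by
  unfold pvP
  rw [List.pairwise_map]
  exact (PySem.List.pairwise_lt_enumerate l 0).filter _

-- A's over_k is the grouping of enumerate(w) restricted to qualifying characters
theorem pv_A_overk (w : String) (k : Int) :
    (PySem.List.pyRange 0 (PySem.Str.len w) 1).foldl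
      (fun d i =>
        if k ≤ (PySem.Chars.count w.toList [PySem.List.pyGetD w.toList i ' '] : Int)
        then d.modify (PySem.List.pyGetD w.toList i ' ') [] (· ++ [i]) else d)
      PySem.Dict.empty
    = pvGrp ((PySem.List.enumerate w.toList).filter (fun p => pvQ w.toList k p.2)) := by
  have he := PySem.List.enumerate_eq_map_pyRange w.toList ' '
  have hlen : PySem.Str.len w = PySem.List.len w.toList := by
    simp [PySem.Str.len_eq, PySem.List.len]
  rw [hlen]
  have h1 := PySem.List.foldl_ite_eq_foldl_filter
        (p := fun i => k ≤ (PySem.Chars.count w.toList [PySem.List.pyGetD w.toList i ' '] : Int))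
        (f := fun (d : PySem.Dict Char (List Int)) i =>
          d.modify (PySem.List.pyGetD w.toList i ' ') [] (· ++ [i]))
        (PySem.List.pyRange 0 (PySem.List.len w.toList) 1) PySem.Dict.empty
  rw [h1]
  unfold pvGrp
  simp only [pvQ]
  rw [he, List.filter_map, List.foldl_map]
  simp [pv_count_singleton, Function.comp_def]

theorem pv_keys_overk (w : String) (k : Int) :
    (pvGrp ((PySem.List.enumerate w.toList).filter (fun p => pvQ w.toList k p.2))).keys
    = (PySem.Set.ofList w.toList).filter (pvQ w.toList k) := by
  rw [pv_keys_grp]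
  have h : ((PySem.List.enumerate w.toList).filter (fun p => pvQ w.toList k p.2)).map (fun p => p.2)
      = w.toList.filter (pvQ w.toList k) := by
    conv_rhs => rw [← PySem.List.map_snd_enumerate w.toList 0]
    rw [List.filter_map]
    simp [Function.comp_def]
  rw [h, pv_ofList_filter]

theorem pv_values_overk (w : String) (k : Int) :
    (pvGrp ((PySem.List.enumerate w.toList).filter (fun p => pvQ w.toList k p.2))).values
    = pvV w.toList k := by
  rw [pv_values_grp]
  have h : ((PySem.List.enumerate w.toList).filter (fun p => pvQ w.toList k p.2)).map (fun p => p.2)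
      = w.toList.filter (pvQ w.toList k) := by
    conv_rhs => rw [← PySem.List.map_snd_enumerate w.toList 0]
    rw [List.filter_map]
    simp [Function.comp_def]
  rw [h, pv_ofList_filter]
  unfold pvV
  apply List.map_congr_left
  intro c hc
  have hq : pvQ w.toList k c = true := (List.mem_filter.mp hc).2
  unfold pvP
  rw [List.filter_filter]
  congr 1
  apply List.filter_congr
  intro p _
  by_cases hp : p.2 = c
  · simp [hp, hq]
  · simp [hp]

theorem pv_A_canon (w : String) (k : Int) :
    str_game w k =
      if pvV w.toList k = [] then [-1]
      else [(pvC w.toList k).foldl min 10001, (pvC w.toList k).foldl max 0] := by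
  simp only [str_game]
  rw [pv_A_overk]
  have hsz : (pvGrp ((PySem.List.enumerate w.toList).filter (fun p => pvQ w.toList k p.2))).size
      = ((PySem.Set.ofList w.toList).filter (pvQ w.toList k)).length := by
    rw [← pv_keys_overk]
    simp [PySem.Dict.size, PySem.Dict.keys]
  have hiff : ((PySem.Set.ofList w.toList).filter (pvQ w.toList k)).length = 0 ↔ pvV w.toList k = [] := by
    unfold pvV
    rw [List.length_eq_zero_iff, ← List.map_eq_nil_iff (f := pvP (PySem.List.enumerate w.toList))]
  by_cases hV : pvV w.toList k = []
  · rw [if_pos hV, if_pos (by rw [hsz]; exact hiff.mpr hV)]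
  · rw [if_neg hV, if_neg (by rw [hsz]; intro h; exact hV (hiff.mp h))]
    rw [pv_values_overk]
    have hinner : ∀ (mm : Int × Int) (pos : List Int),
        (PySem.List.pyRange 0 ((pos.length : Int) - k + 1) 1).foldl
          (fun mm j =>
            (min mm.1 (PySem.List.pyGetD pos (j + k - 1) 0 - PySem.List.pyGetD pos j 0 + 1),
             max mm.2 (PySem.List.pyGetD pos (j + k - 1) 0 - PySem.List.pyGetD pos j 0 + 1)))
          mm
        = (pvW k pos).foldl (fun mm x => (min mm.1 x, max mm.2 x)) mm := by
      intro mm pos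
      rw [pvW, List.foldl_map]
    simp only [hinner]
    rw [← List.foldl_flatMap]
    rw [PySem.List.foldl_prod_mk (f := fun a x => min a x) (g := fun b x => max b x)]
    rfl

theorem pv_k_le_len (l : List Char) (k : Int) (v : List Int) (hv : v ∈ pvV l k) :
    k ≤ (v.length : Int) := by
  obtain ⟨c, hc, rfl⟩ := List.mem_map.mp hv
  have hq : pvQ l k c = true := (List.mem_filter.mp hc).2
  rw [pv_len_P]
  simpa [pvQ] using hq

theorem pv_C_empty_iff (l : List Char) (k : Int) :
    pvC l k = [] ↔ pvV l k = [] := by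
  constructor
  · intro hC
    cases hVc : pvV l k with
    | nil => rfl
    | cons v t =>
      exfalso
      have hv : v ∈ pvV l k := by rw [hVc]; exact List.mem_cons_self
      have hkl : k ≤ (v.length : Int) := pv_k_le_len l k v hv
      have h0 : (0 : Int) ∈ PySem.List.pyRange 0 ((v.length : Int) - k + 1) 1 :=
        PySem.List.mem_pyRange_one.mpr ⟨le_refl 0, by omega⟩
      have hW : pvW k v ≠ [] := by
        unfold pvW
        exact List.ne_nil_of_mem (List.mem_map_of_mem h0)
      have hC' : pvC l k ≠ [] := by
        unfold pvC
        rw [hVc, List.flatMap_cons]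
        intro h
        exact hW (List.append_eq_nil_iff.mp h).1
      exact hC' hC
  · intro h
    simp [pvC, h]

theorem pv_pos_mem (l : List Char) (k : Int) (hk : 1 ≤ k) :
    ∀ x ∈ pvC l k, 1 ≤ x := by
  intro x hx
  obtain ⟨v, hv, hxW⟩ := List.mem_flatMap.mp hx
  have hkl : k ≤ (v.length : Int) := pv_k_le_len l k v hv
  have hpw : v.Pairwise (· < ·) := by
    obtain ⟨c, _, rfl⟩ := List.mem_map.mp hv
    exact pv_pairwise_P l c
  obtain ⟨j, hj, rfl⟩ := List.mem_map.mp hxW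
  obtain ⟨hj0, hj1⟩ := PySem.List.mem_pyRange_one.mp hj
  have hb1 : j + k - 1 < (v.length : Int) := by omega
  have hb0 : (0 : Int) ≤ j + k - 1 := by omega
  rw [PySem.List.pyGetD_eq_getElem v 0 hb0 hb1,
      PySem.List.pyGetD_eq_getElem v 0 hj0 (by omega)]
  have hab : j.toNat ≤ (j + k - 1).toNat := by omega
  have hle : v[j.toNat]'(by omega) ≤ v[(j + k - 1).toNat]'(by omega) := by
    rcases Nat.lt_or_eq_of_le hab with h' | h'
    · exact le_of_lt ((List.pairwise_iff_getElem.mp hpw) j.toNat (j + k - 1).toNat (by omega) (by omega) h')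
    · exact le_of_eq (by congr 1)
  omega

-- ---- B-side machinery: the streaming buffers and the span stream ----

-- one deque update (append with maxlen = k)
def pvBufStep (k : Int) (d : PySem.Dict Char (List Int)) (p : Int × Char) :
    PySem.Dict Char (List Int) :=
  let buf := d.getD p.2 []
  let buf := if (buf.length : Int) = k then buf.drop 1 ++ [p.1] else buf ++ [p.1]
  d.insert p.2 buf

-- the stream of spans B's pass emits, starting from dict state d
def pvSpansFrom (k : Int) (d : PySem.Dict Char (List Int)) : List (Int × Char) → List Int
  | [] => []
  | p :: m =>
    let buf := d.getD p.2 []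
    let buf := if (buf.length : Int) = k then buf.drop 1 ++ [p.1] else buf ++ [p.1]
    (if (buf.length : Int) = k then [p.1 - PySem.List.pyGetD buf 0 0 + 1] else [])
      ++ pvSpansFrom k (d.insert p.2 buf) m

-- "last k elements" of a position list
def pvL (k : Int) (q : List Int) : List Int := q.drop (q.length - k.toNat)

-- B's fold state is (min over emitted spans, max over emitted spans, the buffer dict)
theorem pv_B_fold (k : Int) (m : List (Int × Char)) :
    ∀ (a b : Int) (d : PySem.Dict Char (List Int)),
    m.foldl
      (fun (st : Int × Int × PySem.Dict Char (List Int)) p =>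
        let buf := st.2.2.getD p.2 []
        let buf := if (buf.length : Int) = k then buf.drop 1 ++ [p.1] else buf ++ [p.1]
        let d := st.2.2.insert p.2 buf
        if (buf.length : Int) = k then
          let span := p.1 - PySem.List.pyGetD buf 0 0 + 1
          (min st.1 span, max st.2.1 span, d)
        else (st.1, st.2.1, d))
      (a, b, d)
    = ((pvSpansFrom k d m).foldl min a, (pvSpansFrom k d m).foldl max b,
       m.foldl (pvBufStep k) d) := by
  induction m with
  | nil => intro a b d; simp [pvSpansFrom]
  | cons p m ih =>
    intro a b d
    simp only [List.foldl_cons, pvSpansFrom, pvBufStep]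
    by_cases hc : ((if ((d.getD p.2 []).length : Int) = k
        then (d.getD p.2 []).drop 1 ++ [p.1] else d.getD p.2 [] ++ [p.1]).length : Int) = k
    · simp only [hc, if_pos, if_true]
      rw [ih]
      simp [List.foldl_cons]
    · simp only [hc, if_neg, if_false]
      rw [ih]
      simp

theorem pv_spansFrom_append (k : Int) (m : List (Int × Char)) (p : Int × Char) :
    ∀ d, pvSpansFrom k d (m ++ [p]) =
      pvSpansFrom k d m ++ pvSpansFrom k (m.foldl (pvBufStep k) d) [p] := by
  induction m with
  | nil => intro d; simp [pvSpansFrom]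
  | cons q m ih =>
    intro d
    simp only [List.cons_append, pvSpansFrom, List.foldl_cons, pvBufStep]
    rw [ih]
    simp [pvSpansFrom]

-- multiset bookkeeping for the per-character contributions
theorem pv_flatMap_multiset (f : List Int → List Int) (s : List (List Int)) :
    ((s.flatMap f : List Int) : Multiset Int) = (s.map (fun v => ((f v : List Int) : Multiset Int))).sum := by
  induction s with
  | nil => simp
  | cons v t ih => simp [List.flatMap_cons, ih, ← Multiset.coe_add]

theorem pv_enum_snoc (l : List Char) (a : Char) :
    PySem.List.enumerate (l ++ [a]) = PySem.List.enumerate l ++ [((l.length : Int), a)] := by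
  rw [PySem.List.enumerate_append]
  simp [PySem.List.enumerate_cons, PySem.List.enumerate_nil]

theorem pv_pvL_len (k : Int) (q : List Int) : (pvL k q).length = min q.length k.toNat := by
  simp [pvL]; omega

theorem pv_pvL_snoc (k : Int) (hk : 1 ≤ k) (q : List Int) (x : Int) :
    pvL k (q ++ [x]) = if ((pvL k q).length : Int) = k
      then (pvL k q).drop 1 ++ [x] else pvL k q ++ [x] := by
  have hkk : (k.toNat : Int) = k := Int.toNat_of_nonneg (by omega)
  have hlen := pv_pvL_len k q
  by_cases h : k.toNat ≤ q.length
  · have hcond : ((pvL k q).length : Int) = k := by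
      rw [hlen]; omega
    rw [if_pos hcond]
    unfold pvL
    rw [List.drop_append_of_le_length (by simp; omega), List.drop_drop]
    congr 2
    simp
    omega
  · have hcond : ¬ ((pvL k q).length : Int) = k := by
      rw [hlen]; omega
    rw [if_neg hcond]
    unfold pvL
    have h1 : (q ++ [x]).length - k.toNat = 0 := by simp; omega
    have h2 : q.length - k.toNat = 0 := by omega
    rw [h1, h2, List.drop_zero, List.drop_zero]

theorem pv_getD_append_left (q r : List Int) (i : Int) (h0 : 0 ≤ i) (h1 : i < (q.length : Int)) :
    PySem.List.pyGetD (q ++ r) i 0 = PySem.List.pyGetD q i 0 := by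
  rw [PySem.List.pyGetD_eq_getElem _ 0 h0 (by simp; omega),
      PySem.List.pyGetD_eq_getElem _ 0 h0 h1]
  exact List.getElem_append_left (by omega)

-- the (at most one) new window a snoc-ed position x opens in the list q of earlier positions
def pvT (k : Int) (q : List Int) (x : Int) : List Int :=
  if k ≤ (q.length : Int) + 1
  then [x - PySem.List.pyGetD (q ++ [x]) ((q.length : Int) + 1 - k) 0 + 1] else []

theorem pv_pvW_snoc (k : Int) (hk : 1 ≤ k) (q : List Int) (x : Int) :
    pvW k (q ++ [x]) = pvW k q ++ pvT k q x := by
  unfold pvW pvT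
  by_cases h : k ≤ (q.length : Int) + 1
  · rw [if_pos h]
    have hb : ((q ++ [x]).length : Int) - k + 1 = ((q.length : Int) - k + 1) + 1 := by
      simp; omega
    rw [hb, PySem.List.pyRange_one_succ_right (by omega : (0:Int) ≤ (q.length:Int) - k + 1),
        List.map_append]
    congr 1
    · apply List.map_congr_left
      intro j hj
      obtain ⟨hj0, hj1⟩ := PySem.List.mem_pyRange_one.mp hj
      rw [pv_getD_append_left q [x] j hj0 (by omega),
          pv_getD_append_left q [x] (j + k - 1) (by omega) (by omega)]
    · simp only [List.map_cons, List.map_nil]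
      have hidx : (q.length : Int) - k + 1 + k - 1 = (q.length : Int) := by ring
      have hx : PySem.List.pyGetD (q ++ [x]) (q.length : Int) 0 = x := by
        rw [PySem.List.pyGetD_eq_getElem _ 0 (by omega) (by simp)]
        simp
      rw [hidx, hx]
      have hidx2 : (q.length : Int) - k + 1 = (q.length : Int) + 1 - k := by ring
      rw [hidx2]
  · rw [if_neg h]
    have h1 : ((q ++ [x]).length : Int) - k + 1 ≤ 0 := by simp; omega
    have h2 : (q.length : Int) - k + 1 ≤ 0 := by omega
    rw [PySem.List.pyRange_one_eq_nil (by omega), PySem.List.pyRange_one_eq_nil (by omega)]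
    simp

-- B's step, started on the "last k positions" buffer, emits exactly pvT
theorem pv_step_T (k : Int) (hk : 1 ≤ k) (q : List Int) (x : Int) :
    (let buf := if ((pvL k q).length : Int) = k then (pvL k q).drop 1 ++ [x] else pvL k q ++ [x]
     if ((buf).length : Int) = k then [x - PySem.List.pyGetD buf 0 0 + 1] else []) = pvT k q x := by
  have hb : (if ((pvL k q).length : Int) = k then (pvL k q).drop 1 ++ [x] else pvL k q ++ [x])
      = pvL k (q ++ [x]) := (pv_pvL_snoc k hk q x).symm
  simp only [hb]
  have hlen : (pvL k (q ++ [x])).length = min (q ++ [x]).length k.toNat := pv_pvL_len k (q ++ [x])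
  have hkk : (k.toNat : Int) = k := Int.toNat_of_nonneg (by omega)
  by_cases h : k ≤ (q.length : Int) + 1
  · have hc : ((pvL k (q ++ [x])).length : Int) = k := by
      rw [hlen]; simp; omega
    rw [if_pos hc]
    unfold pvT
    rw [if_pos h]
    have hget : PySem.List.pyGetD (pvL k (q ++ [x])) 0 0
        = PySem.List.pyGetD (q ++ [x]) ((q.length : Int) + 1 - k) 0 := by
      have hl : 0 < (pvL k (q ++ [x])).length := by omega
      rw [PySem.List.pyGetD_eq_getElem _ 0 (by omega) (by exact_mod_cast hl),
          PySem.List.pyGetD_eq_getElem _ 0 (by omega) (by simp; omega)]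
      unfold pvL
      rw [List.getElem_drop]
      congr 1
      simp; omega
    rw [hget]
  · have hc : ¬ ((pvL k (q ++ [x])).length : Int) = k := by
      rw [hlen]; simp; omega
    rw [if_neg hc]
    unfold pvT
    rw [if_neg h]

-- pvP after appending one (position, char) pair
theorem pv_pvP_snoc (e : List (Int × Char)) (n : Int) (a c : Char) :
    pvP (e ++ [(n, a)]) c = pvP e c ++ (if a = c then [n] else []) := by
  unfold pvP
  rw [List.filter_append, List.map_append]
  congr 1
  by_cases h : a = c <;> simp [h]

-- replacing the value at one key a of the summand changes the filtered sum by its delta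
theorem pv_delta (g g' : Char → Multiset Int) (qf q' : Char → Bool) (a : Char) (t : Multiset Int)
    (hg : ∀ c, c ≠ a → g' c = g c) (hq : ∀ c, c ≠ a → q' c = qf c)
    (ha : (if q' a then g' a else 0) = (if qf a then g a else 0) + t) :
    ∀ s : List Char, s.Nodup → a ∈ s →
      ((s.filter q').map g').sum = ((s.filter qf).map g).sum + t := by
  intro s
  induction s with
  | nil => intro _ habs; simp at habs
  | cons c rest ih =>
    intro hnd hmem
    have hndr : rest.Nodup := (List.nodup_cons.mp hnd).2
    by_cases hc : c = a
    · subst hc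
      have hnr : c ∉ rest := (List.nodup_cons.mp hnd).1
      have hfr : rest.filter q' = rest.filter qf :=
        List.filter_congr (fun x hx => hq x (fun h => hnr (h ▸ hx)))
      have hmr : (rest.filter qf).map g' = (rest.filter qf).map g :=
        List.map_congr_left (fun x hx => hg x (fun h => hnr (h ▸ (List.mem_filter.mp hx).1)))
      have ha' := ha
      by_cases hq'a : q' c = true <;> by_cases hqfa : qf c = true <;>
          simp only [hq'a, hqfa, if_true, if_false, Bool.false_eq_true] at ha' <;>
          simp only [List.filter_cons, hq'a, hqfa, if_true, if_false, Bool.false_eq_true,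
            List.map_cons, List.sum_cons, hfr, hmr] <;>
        first
          | (rw [ha']; abel)
          | (rw [add_right_comm, ← ha', zero_add])
          | (have ht : t = 0 := by simpa using ha'.symm
             rw [ht, add_zero])
    · have hmemr : a ∈ rest := by
        rcases List.mem_cons.mp hmem with h | h
        · exact absurd h.symm hc
        · exact h
      have hqc : q' c = qf c := hq c hc
      have hgc : g' c = g c := hg c hc
      by_cases hb : qf c = true
      · simp only [List.filter_cons, hqc, hb, if_true, List.map_cons, List.sum_cons, hgc,
          ih hndr hmemr]
        abel
      · simp only [List.filter_cons, hqc, hb, Bool.false_eq_true, if_false,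
          ih hndr hmemr]

theorem pv_C_multiset (l : List Char) (k : Int) :
    ((pvC l k : List Int) : Multiset Int)
      = (((PySem.Set.ofList l).filter (pvQ l k)).map
          (fun c => ((pvW k (pvP (PySem.List.enumerate l) c) : List Int) : Multiset Int))).sum := by
  unfold pvC pvV
  rw [pv_flatMap_multiset, List.map_map]
  rfl

-- the A-side snoc delta: appending one character a adds exactly pvT's window multiset
theorem pv_C_snoc (k : Int) (hk : 1 ≤ k) (l : List Char) (a : Char) :
    ((pvC (l ++ [a]) k : List Int) : Multiset Int)
      = ((pvC l k : List Int) : Multiset Int)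
        + ((pvT k (pvP (PySem.List.enumerate l) a) (l.length : Int) : List Int) : Multiset Int) := by
  have hcnt : (pvP (PySem.List.enumerate l) a).length = l.count a := pv_len_P l a
  have hcount : ∀ c : Char, c ≠ a → (l ++ [a]).count c = l.count c := by
    intro c hc
    rw [List.count_append]
    simp [Ne.symm hc]
  have hcounta : (l ++ [a]).count a = l.count a + 1 := by
    rw [List.count_append]
    simp
  have hgne : ∀ c : Char, c ≠ a →
      ((pvW k (pvP (PySem.List.enumerate (l ++ [a])) c) : List Int) : Multiset Int)
        = ((pvW k (pvP (PySem.List.enumerate l) c) : List Int) : Multiset Int) := by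
    intro c hc
    rw [pv_enum_snoc, pv_pvP_snoc]
    simp [Ne.symm hc]
  have hqne : ∀ c : Char, c ≠ a → pvQ (l ++ [a]) k c = pvQ l k c := by
    intro c hc
    simp [pvQ, hcount c hc]
  have hga : ((pvW k (pvP (PySem.List.enumerate (l ++ [a])) a) : List Int) : Multiset Int)
      = ((pvW k (pvP (PySem.List.enumerate l) a) : List Int) : Multiset Int)
        + ((pvT k (pvP (PySem.List.enumerate l) a) (l.length : Int) : List Int) : Multiset Int) := by
    rw [pv_enum_snoc, pv_pvP_snoc, if_pos rfl, pv_pvW_snoc k hk, ← Multiset.coe_add]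
  have hWnil : ¬ k ≤ (l.count a : Int) → pvW k (pvP (PySem.List.enumerate l) a) = [] := by
    intro h
    unfold pvW
    rw [hcnt, PySem.List.pyRange_one_eq_nil (by omega)]
    simp
  have hTnil : ¬ k ≤ (l.count a : Int) + 1 → pvT k (pvP (PySem.List.enumerate l) a) (l.length : Int) = [] := by
    intro h
    unfold pvT
    rw [if_neg (by rw [hcnt]; omega)]
  have ha : (if pvQ (l ++ [a]) k a
        then ((pvW k (pvP (PySem.List.enumerate (l ++ [a])) a) : List Int) : Multiset Int) else 0)
      = (if pvQ l k a
          then ((pvW k (pvP (PySem.List.enumerate l) a) : List Int) : Multiset Int) else 0)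
        + ((pvT k (pvP (PySem.List.enumerate l) a) (l.length : Int) : List Int) : Multiset Int) := by
    by_cases h1 : k ≤ (l.count a : Int)
    · rw [if_pos (by simp [pvQ, hcounta]; omega), if_pos (by simp [pvQ]; omega), hga]
    · by_cases h2 : k ≤ (l.count a : Int) + 1
      · rw [if_pos (by simp [pvQ, hcounta]; omega), if_neg (by simp [pvQ]; omega), hga,
            hWnil h1]
        simp
      · rw [if_neg (by simp [pvQ, hcounta]; omega), if_neg (by simp [pvQ]; omega),
            hTnil h2]
        simp
  rw [pv_C_multiset, pv_C_multiset]
  by_cases hmem : a ∈ PySem.Set.ofList l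
  · have hset : PySem.Set.ofList (l ++ [a]) = PySem.Set.ofList l := by
      rw [PySem.Set.ofList_eq_foldl, List.foldl_append, ← PySem.Set.ofList_eq_foldl]
      simp only [List.foldl_cons, List.foldl_nil]
      simp [PySem.Set.add, PySem.Set.contains, hmem]
    rw [hset]
    exact pv_delta _ _ _ _ a _ hgne hqne ha (PySem.Set.ofList l) (PySem.Set.nodup_ofList l) hmem
  · have hnl : a ∉ l := fun h => hmem ((PySem.Set.mem_ofList l a).mpr h)
    have hcnt0 : l.count a = 0 := List.count_eq_zero.mpr hnl
    have hset : PySem.Set.ofList (l ++ [a]) = PySem.Set.ofList l ++ [a] := by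
      rw [PySem.Set.ofList_eq_foldl, List.foldl_append, ← PySem.Set.ofList_eq_foldl]
      simp only [List.foldl_cons, List.foldl_nil]
      simp [PySem.Set.add, PySem.Set.contains, hmem]
    rw [hset, List.filter_append, List.map_append, List.sum_append]
    have hfr : (PySem.Set.ofList l).filter (pvQ (l ++ [a]) k) = (PySem.Set.ofList l).filter (pvQ l k) :=
      List.filter_congr (fun x hx => hqne x (fun h => hmem (h ▸ hx)))
    have hmr : ((PySem.Set.ofList l).filter (pvQ l k)).map
          (fun c => ((pvW k (pvP (PySem.List.enumerate (l ++ [a])) c) : List Int) : Multiset Int))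
        = ((PySem.Set.ofList l).filter (pvQ l k)).map
          (fun c => ((pvW k (pvP (PySem.List.enumerate l) c) : List Int) : Multiset Int)) :=
      List.map_congr_left (fun x hx => hgne x (fun h => hmem (h ▸ (List.mem_filter.mp hx).1)))
    rw [hfr, hmr]
    congr 1
    have htail : (((List.filter (pvQ (l ++ [a]) k) [a]).map
          (fun c => ((pvW k (pvP (PySem.List.enumerate (l ++ [a])) c) : List Int) : Multiset Int))).sum)
        = (if pvQ (l ++ [a]) k a
            then ((pvW k (pvP (PySem.List.enumerate (l ++ [a])) a) : List Int) : Multiset Int) else 0) := by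
      by_cases h : pvQ (l ++ [a]) k a = true <;> simp [h]
    rw [htail, ha, if_neg (by simp [pvQ, hcnt0]; omega)]
    simp

-- the heart: spans stream = pvC as multisets, and the buffers are the last-k position lists
theorem pv_main (k : Int) (hk : 1 ≤ k) (l : List Char) :
    ((pvSpansFrom k PySem.Dict.empty (PySem.List.enumerate l) : List Int) : Multiset Int)
        = ((pvC l k : List Int) : Multiset Int)
    ∧ ∀ c, ((PySem.List.enumerate l).foldl (pvBufStep k) PySem.Dict.empty).getD c []
        = pvL k (pvP (PySem.List.enumerate l) c) := by
  induction l using List.reverseRecOn with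
  | nil =>
    constructor
    · simp [PySem.List.enumerate_nil, pvSpansFrom, pvC, pvV]
    · intro c
      simp [PySem.List.enumerate_nil, pvP, pvL]
  | append_singleton l a ih =>
    obtain ⟨ihS, ihD⟩ := ih
    have hq : pvP (PySem.List.enumerate (l ++ [a])) a
        = pvP (PySem.List.enumerate l) a ++ [(l.length : Int)] := by
      rw [pv_enum_snoc, pv_pvP_snoc]
      simp
    constructor
    · rw [pv_enum_snoc, pv_spansFrom_append, ← Multiset.coe_add, ihS, pv_C_snoc k hk]
      congr 1
      show ((pvSpansFrom k ((PySem.List.enumerate l).foldl (pvBufStep k) PySem.Dict.empty)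
          [((l.length : Int), a)] : List Int) : Multiset Int) = _
      congr 1
      simp only [pvSpansFrom, List.append_nil]
      rw [ihD a]
      exact pv_step_T k hk (pvP (PySem.List.enumerate l) a) (l.length : Int)
    · intro c
      rw [pv_enum_snoc, List.foldl_append, List.foldl_cons, List.foldl_nil, pvBufStep]
      simp only
      rw [PySem.Dict.getD_insert]
      by_cases hc : c = a
      · subst hc
        rw [if_pos rfl, ihD c, pv_pvP_snoc, if_pos rfl, pv_pvL_snoc k hk]
      · rw [if_neg hc, ihD c, pv_pvP_snoc]
        simp [Ne.symm hc]

theorem pv_B_canon (w : String) (k : Int) (hk : 1 ≤ k) :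
    str_game_alt w k =
      if pvC w.toList k = [] then [-1]
      else [(pvC w.toList k).foldl min 10001, (pvC w.toList k).foldl max 0] := by
  obtain ⟨hS, -⟩ := pv_main k hk w.toList
  have hperm : List.Perm (pvSpansFrom k PySem.Dict.empty (PySem.List.enumerate w.toList))
      (pvC w.toList k) := Multiset.coe_eq_coe.mp hS
  simp only [str_game_alt]
  rw [pv_B_fold]
  have hmin : (pvSpansFrom k PySem.Dict.empty (PySem.List.enumerate w.toList)).foldl min 10001
      = (pvC w.toList k).foldl min 10001 := List.Perm.foldl_op_eq hperm
  have hmax : (pvSpansFrom k PySem.Dict.empty (PySem.List.enumerate w.toList)).foldl max 0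
      = (pvC w.toList k).foldl max 0 := List.Perm.foldl_op_eq hperm
  simp only [hmin, hmax]
  have hzero : (pvC w.toList k).foldl max 0 = 0 ↔ pvC w.toList k = [] := by
    constructor
    · intro h
      cases hc : pvC w.toList k with
      | nil => rfl
      | cons x t =>
        exfalso
        have hx1 : 1 ≤ x := pv_pos_mem w.toList k hk x (by rw [hc]; exact List.mem_cons_self)
        have hle : x ≤ (x :: t).foldl max 0 := by
          exact ((PySem.List.le_foldl_max (x :: t) 0).2 x List.mem_cons_self)
        rw [← hc, h] at hle
        omega
    · intro h
      simp [h]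
  by_cases hC : pvC w.toList k = []
  · rw [if_pos (hzero.mpr hC), if_pos hC]
  · rw [if_neg (fun h => hC (hzero.mp h)), if_neg hC]

theorem str_game_spec : Claim_equal_str_game := by
  intro w k hdom hpre
  unfold Spec_str_game
  rcases hpre with hk | hw
  · rw [pv_A_canon, pv_B_canon w k hk]
    by_cases hV : pvV w.toList k = []
    · simp [hV, (pv_C_empty_iff w.toList k).mpr hV]
    · have hC : pvC w.toList k ≠ [] := fun h => hV ((pv_C_empty_iff w.toList k).mp h)
      simp [hV, hC]
  · subst hw
    rfl
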